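-- pv_equiv track=rewrite | github.com/dung321046/Haplotype-Inference-using-Quantum-Annealers | generate-dataset.py | find_h
-- ===== SOURCE A (Python) =====
-- def find_h(h, g):
--     h2 = ''
--     for i, hi in enumerate(h):
--         if int(g[i]) == 2:
--             h2 += str(1 - int(hi))
--         else:
--             if g[i] != hi:
--                 return False, h2
--             h2 += hi
--     return True, h2
-- ===== SOURCE B (Python) =====
-- def find_h(h, g):
--     # two-phase: locate the first inconsistent position, then build the prefix by join
--     i = next((j for j, hj in enumerate(h) if int(g[j]) != 2 and g[j] != hj), None)
--     stop = len(h) if i is None else i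
--     h2 = ''.join(str(1 - int(h[j])) if int(g[j]) == 2 else h[j] for j in range(stop))
--     return i is None, h2
-- ===== Notes on version B (the rewrite author's own statement) =====
-- stated objective: alternative
-- what changed: Replaces A's single fused loop (building h2 while checking) with a two-phase decomposition: first locate the first inconsistent index with next() over enumerate, then construct h2 in one join over the resulting prefix range.
import Mathlib
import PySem

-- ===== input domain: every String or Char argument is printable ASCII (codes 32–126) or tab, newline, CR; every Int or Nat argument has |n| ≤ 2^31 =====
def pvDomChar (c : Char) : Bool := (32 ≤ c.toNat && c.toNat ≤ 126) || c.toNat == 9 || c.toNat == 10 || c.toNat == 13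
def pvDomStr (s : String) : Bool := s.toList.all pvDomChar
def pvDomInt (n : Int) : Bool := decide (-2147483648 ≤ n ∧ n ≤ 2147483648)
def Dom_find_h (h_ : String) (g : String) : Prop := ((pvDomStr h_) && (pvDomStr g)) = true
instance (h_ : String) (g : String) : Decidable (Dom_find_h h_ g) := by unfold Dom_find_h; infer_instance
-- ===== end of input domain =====

-- B is an alternative decomposition of A (find the first inconsistent index, then build the
-- prefix by one join) of the same linear cost; equivalence is about the return value only.

-- ===== PORT A =====
-- the loop of A: index i, accumulator h2; int(g[i])/int(hi) via PySem.Int.ofChars?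
-- (out-of-range / non-int cases are excluded by Pre_find_h, where Python raises)
def goA (g : List Char) : List Char → Nat → List Char → Bool × List Char
  | [], _, acc => (true, acc)
  | hi :: rest, i, acc =>
    let gi := (PySem.List.pyGet? g (i : Int)).getD ' '
    if (PySem.Int.ofChars? [gi]).getD 0 = 2 then
      goA g rest (i + 1) (acc ++ PySem.Int.toChars (1 - (PySem.Int.ofChars? [hi]).getD 0))
    else if gi ≠ hi then (false, acc)
    else goA g rest (i + 1) (acc ++ [hi])

def find_h (h_ : String) (g : String) : Bool × String :=
  let r := goA g.toList h_.toList 0 []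
  (r.1, String.mk r.2)

-- ===== PORT B =====
-- phase 1 of B: first j with int(g[j]) != 2 and g[j] != hj (the next(...) scan)
def firstBad (g : List Char) : List Char → Nat → Option Nat
  | [], _ => none
  | hj :: rest, j =>
    let gj := (PySem.List.pyGet? g (j : Int)).getD ' '
    if (PySem.Int.ofChars? [gj]).getD 0 ≠ 2 ∧ gj ≠ hj then some j
    else firstBad g rest (j + 1)

-- phase 2 of B: the string contributed at index j of the join
def buildPiece (h g : List Char) (j : Nat) : List Char :=
  let gj := (PySem.List.pyGet? g (j : Int)).getD ' '
  if (PySem.Int.ofChars? [gj]).getD 0 = 2 then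
    PySem.Int.toChars (1 - (PySem.Int.ofChars? [(PySem.List.pyGet? h (j : Int)).getD ' ']).getD 0)
  else [(PySem.List.pyGet? h (j : Int)).getD ' ']

def find_h_alt (h_ : String) (g : String) : Bool × String :=
  let hl := h_.toList
  let gl := g.toList
  let i := firstBad gl hl 0
  let stop := i.getD hl.length
  (i.isNone, String.mk ((List.range stop).flatMap (buildPiece hl gl)))

-- ===== PRECONDITION & SPEC =====
-- Pre_: exactly the inputs on which A returns normally — for every position j of h that the
-- loop reaches (all earlier positions passed without returning), g[j] must exist and be a
-- digit, and if g[j] = '2' then h[j] must be a digit too; otherwise Python raises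
-- IndexError/ValueError there.
def Pre_find_h (h_ : String) (g : String) : Prop :=
  ((List.range h_.toList.length).all fun j =>
    !((List.range j).all fun k =>
        (g.toList[k]? == some '2') || (g.toList[k]? == h_.toList[k]?)) ||
    (match g.toList[j]? with
     | some c => c.isDigit && (c != '2' || (h_.toList[j]?).all Char.isDigit)
     | none => false)) = true
instance (h_ : String) (g : String) : Decidable (Pre_find_h h_ g) := by unfold Pre_find_h; infer_instance

def pvWitness_find_h : String × String := ("01", "21")

def Spec_find_h (h_ : String) (g : String) (out : Bool × String) : Prop := out = find_h_alt h_ g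
instance (h_ : String) (g : String) (out : Bool × String) : Decidable (Spec_find_h h_ g out) := by unfold Spec_find_h; infer_instance

-- ===== CLAIM (what is proved, stated in full; the proofs are below) =====
def Claim_equal_find_h : Prop := ∀ (h_ : String) (g : String), Dom_find_h h_ g → Pre_find_h h_ g → Spec_find_h h_ g (find_h h_ g)

-- ===== LEMMAS AND PROOFS =====

theorem firstBad_ge (g : List Char) : ∀ (tl : List Char) (j k : Nat),
    firstBad g tl j = some k → j ≤ k := by
  intro tl
  induction tl with
  | nil => intro j k h; simp [firstBad] at h
  | cons hj rest ih =>
    intro j k h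
    simp only [firstBad] at h
    split at h
    · exact Nat.le_of_eq (Option.some.inj h)
    · exact Nat.le_of_succ_le (ih (j + 1) k h)

theorem goA_eq_phases (g hl : List Char) : ∀ (tl : List Char) (i : Nat) (acc : List Char),
    hl.drop i = tl →
    goA g tl i acc =
      (match firstBad g tl i with
       | none => (true, acc ++ (List.range' i (hl.length - i)).flatMap (buildPiece hl g))
       | some j => (false, acc ++ (List.range' i (j - i)).flatMap (buildPiece hl g))) := by
  intro tl
  induction tl with
  | nil =>
    intro i acc hdrop
    have hlen : hl.length ≤ i := by
      have := congrArg List.length hdrop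
      simp [List.length_drop] at this; omega
    simp [goA, firstBad, Nat.sub_eq_zero_of_le hlen]
  | cons hj rest ih =>
    intro i acc hdrop
    have hi : hl[i]? = some hj := by
      have h0 : (hl.drop i)[0]? = some hj := by rw [hdrop]; rfl
      simpa using h0
    have hilt : i < hl.length := by
      have := List.getElem?_eq_some_iff.mp hi
      exact this.1
    have hrest : hl.drop (i + 1) = rest := by
      have : hl.drop (i + 1) = (hl.drop i).drop 1 := by
        rw [List.drop_drop]
      rw [this, hdrop]; rfl
    have hpiece : (PySem.List.pyGet? hl (i : Int)).getD ' ' = hj := by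
      simp [PySem.List.pyGet?_natCast, hi]
    by_cases c2 : (PySem.Int.ofChars? [(PySem.List.pyGet? g (i : Int)).getD ' ']).getD 0 = 2
    · -- int(g[i]) == 2
      have hb : buildPiece hl g i = PySem.Int.toChars (1 - (PySem.Int.ofChars? [hj]).getD 0) := by
        simp only [buildPiece]
        rw [if_pos c2, hpiece]
      rw [goA, firstBad]
      rw [if_pos c2, if_neg (show ¬((PySem.Int.ofChars? [(PySem.List.pyGet? g (i : Int)).getD ' ']).getD 0 ≠ 2 ∧ (PySem.List.pyGet? g (i : Int)).getD ' ' ≠ hj) from fun hx => hx.1 c2)]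
      rw [ih (i + 1) _ hrest]
      cases hfb : firstBad g rest (i + 1) with
      | none =>
        have hr : List.range' i (hl.length - i) =
            i :: List.range' (i + 1) (hl.length - (i + 1)) := by
          have : hl.length - i = (hl.length - (i + 1)) + 1 := by omega
          rw [this, List.range'_succ]
        simp [hfb, hr, hb]
      | some j =>
        have hj1 : i + 1 ≤ j := firstBad_ge g rest (i + 1) j hfb
        have hr : List.range' i (j - i) = i :: List.range' (i + 1) (j - (i + 1)) := by
          have : j - i = (j - (i + 1)) + 1 := by omega
          rw [this, List.range'_succ]
        simp [hfb, hr, hb]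
    · by_cases cne : (PySem.List.pyGet? g (i : Int)).getD ' ' ≠ hj
      · -- first inconsistent index: return (False, acc)
        rw [goA, firstBad]
        rw [if_neg c2, if_pos cne, if_pos ⟨c2, cne⟩]
        simp [List.range']
      · -- consistent non-2 position
        have heq : (PySem.List.pyGet? g (i : Int)).getD ' ' = hj := by
          by_contra hc; exact cne hc
        have hb : buildPiece hl g i = [hj] := by
          simp only [buildPiece]
          rw [if_neg c2, hpiece]
        rw [goA, firstBad]
        rw [if_neg c2, if_neg cne, if_neg (fun hx => cne hx.2)]
        rw [ih (i + 1) _ hrest]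
        cases hfb : firstBad g rest (i + 1) with
        | none =>
          have hr : List.range' i (hl.length - i) =
              i :: List.range' (i + 1) (hl.length - (i + 1)) := by
            have : hl.length - i = (hl.length - (i + 1)) + 1 := by omega
            rw [this, List.range'_succ]
          simp [hfb, hr, hb]
        | some j =>
          have hj1 : i + 1 ≤ j := firstBad_ge g rest (i + 1) j hfb
          have hr : List.range' i (j - i) = i :: List.range' (i + 1) (j - (i + 1)) := by
            have : j - i = (j - (i + 1)) + 1 := by omega
            rw [this, List.range'_succ]
          simp [hfb, hr, hb]

-- ===== VERDICT (by name: the statement is the Claim_ definition above) =====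
theorem find_h_spec : Claim_equal_find_h := by
  intro h_ g _ _
  unfold Spec_find_h find_h find_h_alt
  have := goA_eq_phases g.toList h_.toList h_.toList 0 [] (by simp)
  rw [this]
  cases hfb : firstBad g.toList h_.toList 0 with
  | none => simp [hfb, List.range_eq_range']
  | some j => simp [hfb, List.range_eq_range']
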